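-- pv_equiv track=rewrite | github.com/LeonardoLordelloFontes/LA2 | Treino1/horario.py | horario
-- ===== SOURCE A (Python) =====
-- def horario(ucs,alunos):
--     l = []
--     for aluno in alunos:
--         d = {}
--         semanais = 0
--         invalid = False
--         for uc in alunos[aluno]:
--
--             if uc in ucs and not invalid:
--                 if ucs[uc][0] not in d:
--                     d[ucs[uc][0]] = set()
--
--                 for n in range(ucs[uc][1]+1, ucs[uc][1]+ucs[uc][2]+1):
--                     if n in d[ucs[uc][0]]:
--                         invalid = True
--                         break
--
--                     else:
--                         d[ucs[uc][0]].add(n)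
--                         semanais += 1
--             else:
--                 invalid = True
--                 break
--
--         if not invalid:
--             l.append((aluno, semanais))
--
--     l.sort(key=lambda t: t[0])
--     l.sort(key=lambda t: t[1], reverse=True)
--     return l
-- ===== SOURCE B (Python) =====
-- def horario(ucs, alunos):
--     l = []
--     for aluno, lst in alunos.items():
--         if all(uc in ucs for uc in lst):
--             pairs = [(ucs[uc][0], slot)
--                      for uc in lst
--                      for slot in range(ucs[uc][1] + 1, ucs[uc][1] + ucs[uc][2] + 1)]
--             if len(pairs) == len(set(pairs)):
--                 l.append((aluno, len(pairs)))
--     return sorted(l, key=lambda t: (-t[1], t[0]))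
-- ===== Notes on version B (the rewrite author's own statement) =====
-- stated objective: simpler
-- what changed: B replaces A's stateful per-day dict-of-sets with break flags by building the flat list of (day, slot) pairs per student and testing validity as len(pairs) == len(set(pairs)), and collapses A's two stable in-place sorts into one sorted() call with the combined key (-hours, name).
import Mathlib
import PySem

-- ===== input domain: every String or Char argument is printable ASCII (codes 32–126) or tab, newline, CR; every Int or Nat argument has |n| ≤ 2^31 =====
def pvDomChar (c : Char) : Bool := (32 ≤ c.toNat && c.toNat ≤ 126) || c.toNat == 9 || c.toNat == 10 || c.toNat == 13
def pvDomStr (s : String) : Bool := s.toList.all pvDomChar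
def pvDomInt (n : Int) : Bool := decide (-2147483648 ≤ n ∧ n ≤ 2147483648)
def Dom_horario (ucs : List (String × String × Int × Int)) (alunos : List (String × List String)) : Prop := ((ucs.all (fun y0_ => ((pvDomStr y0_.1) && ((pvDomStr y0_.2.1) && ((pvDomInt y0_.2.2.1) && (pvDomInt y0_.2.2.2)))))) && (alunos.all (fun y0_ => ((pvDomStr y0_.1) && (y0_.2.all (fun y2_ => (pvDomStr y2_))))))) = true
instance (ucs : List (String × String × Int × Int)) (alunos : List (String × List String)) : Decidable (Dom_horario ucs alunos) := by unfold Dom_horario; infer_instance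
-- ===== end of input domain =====

-- B builds each student's flat (day, slot) pair list and tests validity by len(pairs) == len(set(pairs)),
-- replacing A's stateful dict-of-sets with break flags, and collapses A's two stable sorts into one
-- combined-key sort; objective: simpler.


-- ===== PORT A =====
-- inner `for n in range(...)` loop of A: membership test / add into the day's set, counting added
-- slots, with the `invalid = True; break` flag as the third component
def hSlotLoop (ns : List Int) (s : PySem.Set Int) : PySem.Set Int × Int × Bool :=
  match ns with
  | [] => (s, 0, false)
  | n :: rest =>
    if PySem.Set.contains s n then (s, 0, true)
    else
      let r := hSlotLoop rest (PySem.Set.add s n)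
      (r.1, r.2.1 + 1, r.2.2)

-- outer `for uc in alunos[aluno]` loop of A over the state (d, semanais, invalid); a `true` second
-- component is A's `invalid` (the break exits the loop and the student is dropped)
def hUcLoop (ucsD : PySem.Dict String (String × Int × Int)) (lst : List String)
    (d : PySem.Dict String (PySem.Set Int)) (semanais : Int) : Int × Bool :=
  match lst with
  | [] => (semanais, false)
  | uc :: rest =>
    if ucsD.contains uc then
      let info := ucsD.getD uc ("", 0, 0)   -- ucs[uc]; contains-guarded, so the default is never read
      let d := if d.contains info.1 then d else d.insert info.1 PySem.Set.empty
      let r := hSlotLoop (PySem.List.pyRange (info.2.1 + 1) (info.2.1 + info.2.2 + 1))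
                 (d.getD info.1 PySem.Set.empty)
      if r.2.2 then (semanais + r.2.1, true)
      else hUcLoop ucsD rest (d.insert info.1 r.1) (semanais + r.2.1)
    else (semanais, true)

def horario (ucs : List (String × String × Int × Int)) (alunos : List (String × List String)) : List (String × Int) :=
  let ucsD := PySem.Dict.ofList ucs
  let alunosD := PySem.Dict.ofList alunos
  let l := alunosD.keys.foldl (fun l aluno =>
    let r := hUcLoop ucsD (alunosD.getD aluno []) PySem.Dict.empty 0
    if r.2 then l else l ++ [(aluno, r.1)]) []
  PySem.List.sorted (PySem.List.sorted l (fun t => t.1) false) (fun t => t.2) true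

-- ===== PORT B =====
-- the flat list of (day, slot) pairs of one student (B's nested list comprehension)
def hPairs (ucsD : PySem.Dict String (String × Int × Int)) (lst : List String) : List (String × Int) :=
  lst.flatMap (fun uc =>
    let v := ucsD.getD uc ("", 0, 0)   -- ucs[uc]; only reached when every uc is in ucs
    (PySem.List.pyRange (v.2.1 + 1) (v.2.1 + v.2.2 + 1)).map (fun slot => (v.1, slot)))

def horario_alt (ucs : List (String × String × Int × Int)) (alunos : List (String × List String)) : List (String × Int) :=
  let ucsD := PySem.Dict.ofList ucs
  let alunosD := PySem.Dict.ofList alunos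
  let l := alunosD.items.foldl (fun l p =>
    if p.2.all (fun uc => ucsD.contains uc) then
      let pairs := hPairs ucsD p.2
      if (pairs.length : Int) = ((PySem.Set.ofList pairs).length : Int) then
        l ++ [(p.1, (pairs.length : Int))]
      else l
    else l) []
  PySem.List.sorted2 l (fun t => -t.2) (fun t => t.1) false

-- ===== PRECONDITION & SPEC =====
def Spec_horario (ucs : List (String × String × Int × Int)) (alunos : List (String × List String)) (out : List (String × Int)) : Prop := out = horario_alt ucs alunos
instance (ucs : List (String × String × Int × Int)) (alunos : List (String × List String)) (out : List (String × Int)) : Decidable (Spec_horario ucs alunos out) := by unfold Spec_horario; infer_instance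

-- ===== CLAIM (what is proved, stated in full; the proofs are below) =====
def Claim_equal_horario : Prop := ∀ (ucs : List (String × String × Int × Int)) (alunos : List (String × List String)), Dom_horario ucs alunos → Spec_horario ucs alunos (horario ucs alunos)

-- ===== LEMMAS AND PROOFS =====

lemma nodup_pyRange : ∀ (n : Nat) (a b : Int), (b - a).toNat = n → (PySem.List.pyRange a b).Nodup := by
  intro n
  induction n with
  | zero =>
    intro a b h
    have he : PySem.List.pyRange a b = [] := by
      apply List.eq_nil_iff_forall_not_mem.mpr
      intro x hx
      rw [PySem.List.mem_pyRange_one] at hx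
      omega
    simp [he]
  | succ k ih =>
    intro a b h
    by_cases hlt : a < b
    · rw [PySem.List.pyRange_one_cons hlt]
      refine List.nodup_cons.mpr ⟨?_, ih (a+1) b (by omega)⟩
      intro hx
      rw [PySem.List.mem_pyRange_one] at hx
      omega
    · omega

lemma slotLoop_spec (ns : List Int) (s : PySem.Set Int) (hnd : ns.Nodup) :
    ((hSlotLoop ns s).2.2 = false ↔ ∀ n ∈ ns, n ∉ s) ∧
    ((∀ n ∈ ns, n ∉ s) →
      (∀ m, m ∈ (hSlotLoop ns s).1 ↔ m ∈ s ∨ m ∈ ns) ∧ (hSlotLoop ns s).2.1 = (ns.length : Int)) := by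
  induction ns generalizing s with
  | nil => simp [hSlotLoop]
  | cons n rest ih =>
    rcases List.nodup_cons.mp hnd with ⟨hn, hrest⟩
    by_cases hmem : n ∈ s
    · have hc : PySem.Set.contains s n = true := (PySem.Set.contains_iff s n).mpr hmem
      constructor
      · simp only [hSlotLoop, hc, if_true]
        simp only [show (true = false) ↔ False by simp, false_iff]
        intro hall
        exact (hall n (List.mem_cons_self)) hmem
      · intro hall
        exact absurd hmem (hall n List.mem_cons_self)
    · have hc : PySem.Set.contains s n = false := by
        rw [← Bool.not_eq_true, PySem.Set.contains_iff]; exact hmem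
      have hres : hSlotLoop (n :: rest) s =
          ((hSlotLoop rest (PySem.Set.add s n)).1,
           (hSlotLoop rest (PySem.Set.add s n)).2.1 + 1,
           (hSlotLoop rest (PySem.Set.add s n)).2.2) := by
        simp only [hSlotLoop, hc, Bool.false_eq_true, if_false]
      have hfresh : ∀ m ∈ rest, m ∉ PySem.Set.add s n ↔ m ∉ s := by
        intro m hm
        rw [PySem.Set.mem_add]
        constructor
        · intro h hms; exact h (Or.inl hms)
        · rintro h (hms | hme)
          · exact h hms
          · exact hn (hme ▸ hm)
      obtain ⟨ih1, ih2⟩ := ih (PySem.Set.add s n) hrest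
      constructor
      · rw [hres]
        simp only []
        rw [ih1]
        constructor
        · intro h m hm
          rcases List.mem_cons.mp hm with rfl | hm'
          · exact hmem
          · exact (hfresh m hm').mp (h m hm')
        · intro h m hm
          exact (hfresh m hm).mpr (h m (List.mem_cons_of_mem _ hm))
      · intro hall
        have hall' : ∀ m ∈ rest, m ∉ PySem.Set.add s n := by
          intro m hm
          exact (hfresh m hm).mpr (hall m (List.mem_cons_of_mem _ hm))
        obtain ⟨hmem2, hcnt⟩ := ih2 hall'
        rw [hres]
        refine ⟨?_, ?_⟩
        · intro m
          simp only []
          rw [hmem2 m, PySem.Set.mem_add, List.mem_cons]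
          tauto
        · simp only []
          rw [hcnt, List.length_cons]
          push_cast
          ring

lemma ucLoop_spec (ucsD : PySem.Dict String (String × Int × Int)) :
    ∀ (lst : List String) (d : PySem.Dict String (PySem.Set Int)) (sem : Int) (P : List (String × Int)),
    (∀ day n, (day, n) ∈ P ↔ n ∈ d.getD day PySem.Set.empty) → P.Nodup →
    ((hUcLoop ucsD lst d sem).2 = false ↔
      ((∀ uc ∈ lst, ucsD.contains uc = true) ∧ (P ++ hPairs ucsD lst).Nodup)) ∧
    ((hUcLoop ucsD lst d sem).2 = false →
      (hUcLoop ucsD lst d sem).1 = sem + ((hPairs ucsD lst).length : Int)) := by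
  intro lst
  induction lst with
  | nil =>
    intro d sem P hinv hnd
    simp [hUcLoop, hPairs, hnd]
  | cons uc rest ih =>
    intro d sem P hinv hnd
    by_cases hc : ucsD.contains uc = true
    · set info := ucsD.getD uc ("", 0, 0) with hinfo
      set day := info.1 with hday
      set ns := PySem.List.pyRange (info.2.1 + 1) (info.2.1 + info.2.2 + 1) with hns
      set d1 := if d.contains day then d else d.insert day PySem.Set.empty with hd1
      have hgetD : ∀ k, d1.getD k PySem.Set.empty = d.getD k PySem.Set.empty := by
        intro k
        rw [hd1]
        by_cases hck : d.contains day = true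
        · rw [if_pos hck]
        · rw [if_neg hck]
          by_cases hk : k = day
          · subst hk
            rw [PySem.Dict.getD_insert_self,
              PySem.Dict.getD_of_not_contains d _ (by simpa using hck)]
          · rw [PySem.Dict.getD_insert_of_ne _ _ _ hk]
      set s := d1.getD day PySem.Set.empty with hs
      set r := hSlotLoop ns s with hr
      have hnsnd : ns.Nodup := nodup_pyRange _ _ _ rfl
      obtain ⟨sl1, sl2⟩ := slotLoop_spec ns s hnsnd
      have hunf : hUcLoop ucsD (uc :: rest) d sem =
          (if r.2.2 then (sem + r.2.1, true) else hUcLoop ucsD rest (d1.insert day r.1) (sem + r.2.1)) := by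
        simp only [hUcLoop, hc, if_true, ← hinfo, ← hday, ← hns, ← hd1, ← hs, ← hr]
      have hpairs_cons : hPairs ucsD (uc :: rest) = ns.map (fun n => (day, n)) ++ hPairs ucsD rest := by
        simp only [hPairs, List.flatMap_cons, ← hinfo, ← hday, ← hns]
      have hsmem : ∀ n, n ∈ s ↔ (day, n) ∈ P := by
        intro n
        rw [hs, hgetD day, ← hinv day n]
      by_cases hbad : r.2.2 = true
      · rw [hunf, if_pos hbad]
        have hex : ∃ n ∈ ns, n ∈ s := by
          by_contra hno
          push Not at hno
          rw [sl1.mpr hno] at hbad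
          exact Bool.false_ne_true hbad
        obtain ⟨n, hnns, hnss⟩ := hex
        have hPmem : (day, n) ∈ P := (hsmem n).mp hnss
        constructor
        · apply iff_of_false (by simp)
          rintro ⟨hall, hnodup⟩
          rw [hpairs_cons, ← List.append_assoc] at hnodup
          rcases List.nodup_append.mp hnodup with ⟨hnodup1, _, _⟩
          rcases List.nodup_append.mp hnodup1 with ⟨_, _, hdisj⟩
          exact hdisj _ hPmem _ (List.mem_map.mpr ⟨n, hnns, rfl⟩) rfl
        · intro h
          simp at h
      · have hbad' : r.2.2 = false := by simpa using hbad
        have hfr : ∀ n ∈ ns, n ∉ s := sl1.mp hbad'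
        obtain ⟨hmem2, hcnt⟩ := sl2 hfr
        have hinv' : ∀ dy m, (dy, m) ∈ P ++ ns.map (fun n => (day, n)) ↔
            m ∈ (d1.insert day r.1).getD dy PySem.Set.empty := by
          intro dy m
          rw [List.mem_append]
          by_cases hdy : dy = day
          · subst hdy
            rw [PySem.Dict.getD_insert_self, hmem2 m]
            constructor
            · rintro (hp | hm)
              · exact Or.inl ((hsmem m).mpr hp)
              · rcases List.mem_map.mp hm with ⟨n, hn, heq⟩
                cases heq
                exact Or.inr hn
            · rintro (hsm | hnm)
              · exact Or.inl ((hsmem m).mp hsm)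
              · exact Or.inr (List.mem_map.mpr ⟨m, hnm, rfl⟩)
          · rw [PySem.Dict.getD_insert_of_ne _ _ _ hdy, hgetD dy, ← hinv dy m]
            constructor
            · rintro (hp | hm)
              · exact hp
              · rcases List.mem_map.mp hm with ⟨n, hn, heq⟩
                cases heq
                exact absurd rfl hdy
            · exact Or.inl
        have hnd' : (P ++ ns.map (fun n => (day, n))).Nodup := by
          rw [List.nodup_append]
          refine ⟨hnd, hnsnd.map (fun a b hab => by simpa using congrArg Prod.snd hab), ?_⟩
          intro x hxP y hyM heq
          subst heq
          rcases List.mem_map.mp hyM with ⟨n, hn, heq⟩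
          subst heq
          exact hfr n hn ((hsmem n).mpr hxP)
        obtain ⟨ih1, ih2⟩ := ih (d1.insert day r.1) (sem + r.2.1) (P ++ ns.map (fun n => (day, n))) hinv' hnd'
        rw [hunf, if_neg (by simpa using hbad)]
        constructor
        · rw [ih1, hpairs_cons, ← List.append_assoc]
          constructor
          · rintro ⟨hall, hnodup⟩
            exact ⟨fun u hu => by
              rcases List.mem_cons.mp hu with rfl | hu'
              · exact hc
              · exact hall u hu', hnodup⟩
          · rintro ⟨hall, hnodup⟩
            exact ⟨fun u hu => hall u (List.mem_cons_of_mem _ hu), hnodup⟩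
        · intro hval
          rw [ih2 hval, hcnt, hpairs_cons, List.length_append, List.length_map]
          push_cast
          ring
    · have hunf : hUcLoop ucsD (uc :: rest) d sem = (sem, true) := by
        simp only [hUcLoop, hc, Bool.false_eq_true, if_false]
      rw [hunf]
      constructor
      · apply iff_of_false (by simp)
        rintro ⟨hall, _⟩
        exact hc (hall uc List.mem_cons_self)
      · intro h
        simp at h

lemma nodup_iff_len (xs : List (String × Int)) :
    xs.Nodup ↔ ((xs.length : Int) = ((PySem.Set.ofList xs).length : Int)) := by
  constructor
  · intro h
    rw [PySem.Set.ofList_eq_self_of_nodup xs h]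
  · intro h
    have hlen : xs.length ≤ (PySem.Set.ofList xs).length := by omega
    have hsub : (PySem.Set.ofList xs).Subperm xs :=
      (PySem.Set.nodup_ofList xs).subperm (fun a ha => (PySem.Set.mem_ofList xs a).mp ha)
    have hperm : (PySem.Set.ofList xs).Perm xs := hsub.perm_of_length_le hlen
    exact hperm.nodup (PySem.Set.nodup_ofList xs)

-- the per-student entries appended by the two ports agree
lemma student_step (ucsD : PySem.Dict String (String × Int × Int)) (l : List (String × Int))
    (aluno : String) (lst : List String) :
    (let r := hUcLoop ucsD lst PySem.Dict.empty 0
     if r.2 then l else l ++ [(aluno, r.1)]) =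
    (if lst.all (fun uc => ucsD.contains uc) then
      if ((hPairs ucsD lst).length : Int) = ((PySem.Set.ofList (hPairs ucsD lst)).length : Int) then
        l ++ [(aluno, ((hPairs ucsD lst).length : Int))]
      else l
    else l) := by
  have hinv : ∀ (day : String) (n : Int), (day, n) ∈ ([] : List (String × Int)) ↔
      n ∈ (PySem.Dict.empty : PySem.Dict String (PySem.Set Int)).getD day PySem.Set.empty := by
    intro day n
    simp [pysem]
  obtain ⟨h1, h2⟩ := ucLoop_spec ucsD lst PySem.Dict.empty 0 [] hinv List.nodup_nil
  simp only [List.nil_append] at h1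
  by_cases hv : (hUcLoop ucsD lst PySem.Dict.empty 0).2 = false
  · obtain ⟨hall, hnodup⟩ := h1.mp hv
    have hlen := h2 hv
    have ha : lst.all (fun uc => ucsD.contains uc) = true := List.all_eq_true.mpr hall
    have hlq : ((hPairs ucsD lst).length : Int) = ((PySem.Set.ofList (hPairs ucsD lst)).length : Int) :=
      (nodup_iff_len _).mp hnodup
    simp only [hv, Bool.false_eq_true, if_false, ha, if_true, hlq, hlen]
    simp
  · have hv' : (hUcLoop ucsD lst PySem.Dict.empty 0).2 = true := by
      simpa using hv
    simp only [hv', if_true]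
    by_cases hall : lst.all (fun uc => ucsD.contains uc) = true
    · by_cases hlq : ((hPairs ucsD lst).length : Int) = ((PySem.Set.ofList (hPairs ucsD lst)).length : Int)
      · exfalso
        apply hv
        exact h1.mpr ⟨fun u hu => List.all_eq_true.mp hall u hu, (nodup_iff_len _).mpr hlq⟩
      · simp only [hall, if_true, hlq, if_false]
    · simp only [hall, Bool.false_eq_true, if_false]

-- generic stability lemmas for the insertion sort behind PySem.List.sorted / sorted2
lemma insertBy_pairwise {α : Type} {R : α → α → Prop} (htrans : ∀ a b c, R a b → R b c → R a c)
    {before : α → α → Bool} {x : α} (hT : ∀ y, before x y = true → R x y) :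
    ∀ {ys : List α}, (∀ y ∈ ys, before x y = false → R y x) → ys.Pairwise R →
      (PySem.List.insertBy before x ys).Pairwise R := by
  intro ys
  induction ys with
  | nil => intro _ _; simp [PySem.List.insertBy]
  | cons y ys' ih =>
    intro hF hp
    rcases List.pairwise_cons.mp hp with ⟨hy, hp'⟩
    by_cases hb : before x y = true
    · simp only [PySem.List.insertBy, hb, if_true]
      refine List.pairwise_cons.mpr ⟨?_, hp⟩
      intro z hz
      rcases List.mem_cons.mp hz with rfl | hz'
      · exact hT z hb
      · exact htrans _ _ _ (hT y hb) (hy z hz')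
    · have hb' : before x y = false := by simpa using hb
      simp only [PySem.List.insertBy, hb', Bool.false_eq_true, if_false]
      refine List.pairwise_cons.mpr ⟨?_, ?_⟩
      · intro z hz
        rcases (PySem.List.mem_insertBy before x z ys').mp hz with rfl | hz'
        · exact hF y List.mem_cons_self hb'
        · exact hy z hz'
      · exact ih (fun z hz hbz => hF z (List.mem_cons_of_mem _ hz) hbz) hp'

lemma foldl_insertBy_pairwise {α : Type} {R : α → α → Prop} (htrans : ∀ a b c, R a b → R b c → R a c)
    {before : α → α → Bool} :
    ∀ (xs acc : List α),
    (∀ x ∈ xs, ∀ y, before x y = true → R x y) →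
    (∀ x ∈ xs, ∀ y ∈ acc, before x y = false → R y x) →
    xs.Pairwise (fun a b => before b a = false → R a b) →
    acc.Pairwise R →
    (xs.foldl (fun acc x => PySem.List.insertBy before x acc) acc).Pairwise R := by
  intro xs
  induction xs with
  | nil => intro acc _ _ _ h; simpa using h
  | cons x xs' ih =>
    intro acc hT hC hX hA
    rcases List.pairwise_cons.mp hX with ⟨hx, hX'⟩
    simp only [List.foldl_cons]
    apply ih
    · intro z hz y hby
      exact hT z (List.mem_cons_of_mem _ hz) y hby
    · intro z hz y hy hby
      rcases (PySem.List.mem_insertBy before x y acc).mp hy with rfl | hy'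
      · exact hx z hz hby
      · exact hC z (List.mem_cons_of_mem _ hz) y hy' hby
    · exact hX'
    · exact insertBy_pairwise htrans (fun y hby => hT x List.mem_cons_self y hby)
        (fun y hy hby => hC x List.mem_cons_self y hy hby) hA

-- A's two stable sorts and B's single combined-key sort produce the same list
lemma sort_eq (l : List (String × Int)) :
    PySem.List.sorted (PySem.List.sorted l (fun t => t.1) false) (fun t => t.2) true
      = PySem.List.sorted2 l (fun t => -t.2) (fun t => t.1) false := by
  have hle : ∀ a b : String × Int,
      (fun t : String × Int => toLex (-t.2, t.1)) a ≤ (fun t : String × Int => toLex (-t.2, t.1)) b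
        ↔ (-a.2 < -b.2 ∨ (-a.2 = -b.2 ∧ a.1 ≤ b.1)) := by
    intro a b
    rw [Prod.Lex.le_iff]
    simp
  have htrans : ∀ a b c : String × Int,
      (fun t : String × Int => toLex (-t.2, t.1)) a ≤ (fun t : String × Int => toLex (-t.2, t.1)) b →
      (fun t : String × Int => toLex (-t.2, t.1)) b ≤ (fun t : String × Int => toLex (-t.2, t.1)) c →
      (fun t : String × Int => toLex (-t.2, t.1)) a ≤ (fun t : String × Int => toLex (-t.2, t.1)) c :=
    fun _ _ _ h1 h2 => le_trans h1 h2
  have hinj : Function.Injective (fun t : String × Int => toLex (-t.2, t.1)) := by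
    intro a b h
    have h' : ((-a.2 : Int), a.1) = ((-b.2 : Int), b.1) := h
    have h1 : -a.2 = -b.2 := congrArg Prod.fst h'
    have h2 : a.1 = b.1 := congrArg Prod.snd h'
    have : a.2 = b.2 := by omega
    exact Prod.ext h2 this
  have pA : (PySem.List.sorted (PySem.List.sorted l (fun t => t.1) false) (fun t => t.2) true).Pairwise
      (fun a b => (fun t : String × Int => toLex (-t.2, t.1)) a ≤ (fun t : String × Int => toLex (-t.2, t.1)) b) := by
    rw [PySem.List.sorted_rev_eq_foldl_insertBy]
    apply foldl_insertBy_pairwise htrans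
    · intro x _ y hby
      rw [hle]
      have : y.2 < x.2 := of_decide_eq_true hby
      left; omega
    · intro x _ y hy _
      simp at hy
    · have hp := PySem.List.sorted_pairwise l (fun t => t.1)
      refine hp.imp ?_
      intro a b hab hba
      have hb : ¬ (a.2 < b.2) := of_decide_eq_false hba
      rw [hle]
      rcases lt_or_eq_of_le (by omega : -a.2 ≤ -b.2) with h | h
      · exact Or.inl h
      · exact Or.inr ⟨h, hab⟩
    · exact List.Pairwise.nil
  have pB : (PySem.List.sorted2 l (fun t => -t.2) (fun t => t.1) false).Pairwise
      (fun a b => (fun t : String × Int => toLex (-t.2, t.1)) a ≤ (fun t : String × Int => toLex (-t.2, t.1)) b) := by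
    have hrw : PySem.List.sorted2 l (fun t : String × Int => -t.2) (fun t => t.1) false
        = l.foldl (fun acc x => PySem.List.insertBy
            (fun a b => decide (-a.2 < -b.2) || (!decide (-b.2 < -a.2) && decide (a.1 < b.1))) x acc) [] := rfl
    rw [hrw]
    apply foldl_insertBy_pairwise htrans
    · intro x _ y hby
      rw [hle]
      rcases Bool.or_eq_true_iff.mp hby with h | h
      · exact Or.inl (of_decide_eq_true h)
      · rcases Bool.and_eq_true_iff.mp h with ⟨h1, h2⟩
        have hn : ¬ (-y.2 < -x.2) := of_decide_eq_false (by simpa using h1)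
        have hs : x.1 < y.1 := of_decide_eq_true h2
        rcases lt_or_eq_of_le (by omega : -x.2 ≤ -y.2) with hh | hh
        · exact Or.inl hh
        · exact Or.inr ⟨hh, le_of_lt hs⟩
    · intro x _ y hy _
      simp at hy
    · refine List.pairwise_iff_forall_sublist.mpr ?_
      intro a b _ hba
      rw [hle]
      rcases Bool.or_eq_false_iff.mp hba with ⟨h1, h2⟩
      have hn1 : ¬ (-b.2 < -a.2) := of_decide_eq_false h1
      rcases lt_or_eq_of_le (by omega : -a.2 ≤ -b.2) with hh | hh
      · exact Or.inl hh
      · refine Or.inr ⟨hh, ?_⟩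
        rcases Bool.and_eq_false_iff.mp h2 with h3 | h3
        · exfalso
          have : decide (-a.2 < -b.2) = true := by simpa using h3
          have := of_decide_eq_true this
          omega
        · exact le_of_not_gt (of_decide_eq_false h3)
    · exact List.Pairwise.nil
  have hperm : (PySem.List.sorted (PySem.List.sorted l (fun t => t.1) false) (fun t => t.2) true).Perm
      (PySem.List.sorted2 l (fun t => -t.2) (fun t => t.1) false) :=
    ((PySem.List.sorted_perm _ _ _).trans (PySem.List.sorted_perm _ _ _)).trans
      (PySem.List.sorted2_perm l _ _ _).symm
  exact PySem.List.eq_of_perm_of_pairwise_le_of_injective _ hinj hperm pA pB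

-- ===== VERDICT (by name: the statement is the Claim_ definition above) =====
theorem horario_spec : Claim_equal_horario := by
  intro ucs alunos _
  unfold Spec_horario horario horario_alt
  dsimp only
  rw [PySem.Dict.items_eq_map_keys _ (PySem.Dict.nodup_keys_ofList alunos) [], List.foldl_map]
  have hf : (fun (l : List (String × Int)) (aluno : String) =>
        let r := hUcLoop (PySem.Dict.ofList ucs) ((PySem.Dict.ofList alunos).getD aluno []) PySem.Dict.empty 0
        if r.2 then l else l ++ [(aluno, r.1)]) =
      (fun (l : List (String × Int)) (k : String) =>
        if ((PySem.Dict.ofList alunos).getD k []).all (fun uc => (PySem.Dict.ofList ucs).contains uc) then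
          if (((hPairs (PySem.Dict.ofList ucs) ((PySem.Dict.ofList alunos).getD k [])).length : Int) =
              ((PySem.Set.ofList (hPairs (PySem.Dict.ofList ucs) ((PySem.Dict.ofList alunos).getD k []))).length : Int)) then
            l ++ [(k, ((hPairs (PySem.Dict.ofList ucs) ((PySem.Dict.ofList alunos).getD k [])).length : Int))]
          else l
        else l) := by
    funext l k
    exact student_step (PySem.Dict.ofList ucs) l k ((PySem.Dict.ofList alunos).getD k [])
  rw [hf]
  exact sort_eq _
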